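-- pv_equiv track=rewrite | github.com/creepereye1204/TIL | Algorithm/프로그래머스/이진 탐색/Level3/Level2/[PCCP 기출문제] 2번 퍼즐 게임 챌린지/code.py | solve
-- ===== SOURCE A (Python) =====
-- def solve(level, diffs, times, limit):
--     if diffs[0] > level:
--         return False
--     limit -= times[0]
--     for i in range(1, len(diffs)):
--         if level >= diffs[i]:
--             limit -= times[i]
--         else:
--             limit -= ((times[i-1]+times[i])*(diffs[i]-level)+times[i])
--
--     return limit >= 0
-- ===== SOURCE B (Python) =====
-- def solve(level, diffs, times, limit):
--     if diffs[0] > level: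
--         return False
--     lates = [max(d - level, 0) for d in diffs]
--     weights = [1 + a + b for a, b in zip(lates, lates[1:] + [0])]
--     return sum(t * w for t, w in zip(times, weights)) <= limit
-- ===== Notes on version B (the rewrite author's own statement) =====
-- stated objective: alternative
-- what changed: A's branching per-level budget-decrement loop is replaced by a per-time regrouping: a branch-free lateness vector max(d-level,0), a shifted-zip weight vector 1+lates[i]+lates[i+1] giving each times[i] its multiplicity, and a final dot-product comparison against limit.
import Mathlib
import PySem

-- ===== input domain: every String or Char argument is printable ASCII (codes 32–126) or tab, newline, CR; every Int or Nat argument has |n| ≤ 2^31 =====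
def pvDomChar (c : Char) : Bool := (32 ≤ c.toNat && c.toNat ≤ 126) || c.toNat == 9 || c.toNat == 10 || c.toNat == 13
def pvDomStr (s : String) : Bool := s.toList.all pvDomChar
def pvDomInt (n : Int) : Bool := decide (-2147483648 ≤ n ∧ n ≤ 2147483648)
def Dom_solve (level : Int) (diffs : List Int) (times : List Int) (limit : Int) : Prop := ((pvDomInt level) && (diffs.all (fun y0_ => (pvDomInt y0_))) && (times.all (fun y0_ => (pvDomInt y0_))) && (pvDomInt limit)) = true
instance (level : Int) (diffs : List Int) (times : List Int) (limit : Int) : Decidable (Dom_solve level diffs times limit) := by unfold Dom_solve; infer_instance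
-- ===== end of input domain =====

-- B replaces A's branching budget-decrement loop by a branch-free lateness vector, a
-- shifted-zip weight (multiplicity) vector, and a dot product against limit (objective: alternative).

-- ===== PORT A =====
def solve (level : Int) (diffs : List Int) (times : List Int) (limit : Int) : Bool :=
  if PySem.List.pyGetD diffs 0 0 > level then false
  else
    let limit1 := limit - PySem.List.pyGetD times 0 0
    let limit2 := (PySem.List.pyRange 1 (diffs.length : Int) 1).foldl
      (fun lim i =>
        if level ≥ PySem.List.pyGetD diffs i 0 then
          lim - PySem.List.pyGetD times i 0
        else
          lim - ((PySem.List.pyGetD times (i-1) 0 + PySem.List.pyGetD times i 0) *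
                   (PySem.List.pyGetD diffs i 0 - level) + PySem.List.pyGetD times i 0)) limit1
    decide (limit2 ≥ 0)

-- ===== PORT B =====
def solve_alt (level : Int) (diffs : List Int) (times : List Int) (limit : Int) : Bool :=
  if PySem.List.pyGetD diffs 0 0 > level then false
  else
    let lates := diffs.map (fun d => max (d - level) 0)
    let weights := (lates.zip (lates.tail ++ [0])).map (fun x => 1 + x.1 + x.2)
    decide (((times.zip weights).map (fun x => x.1 * x.2)).sum ≤ limit)

-- ===== PRECONDITION & SPEC =====
-- Pre_ excludes exactly the inputs where A raises IndexError: empty diffs, and (when the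
-- first guard does not return early) times shorter than diffs.
def Pre_solve (level : Int) (diffs : List Int) (times : List Int) (limit : Int) : Prop :=
  diffs ≠ [] ∧ (PySem.List.pyGetD diffs 0 0 ≤ level → diffs.length ≤ times.length)
instance (level : Int) (diffs : List Int) (times : List Int) (limit : Int) : Decidable (Pre_solve level diffs times limit) := by unfold Pre_solve; infer_instance

def pvWitness_solve : Int × List Int × List Int × Int := (3, [1, 2, 4], [10, 5, 8], 100)

def Spec_solve (level : Int) (diffs : List Int) (times : List Int) (limit : Int) (out : Bool) : Prop := out = solve_alt level diffs times limit
instance (level : Int) (diffs : List Int) (times : List Int) (limit : Int) (out : Bool) : Decidable (Spec_solve level diffs times limit out) := by unfold Spec_solve; infer_instance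

-- ===== CLAIM (what is proved, stated in full; the proofs are below) =====
def Claim_equal_solve : Prop := ∀ (level : Int) (diffs : List Int) (times : List Int) (limit : Int), Dom_solve level diffs times limit → Pre_solve level diffs times limit → Spec_solve level diffs times limit (solve level diffs times limit)

-- ===== LEMMAS AND PROOFS =====

-- A's per-index cost, written as structural recursion carrying the previous time value.
def costF (level : Int) : Int → List Int → List Int → Int
  | _, [], _ => 0
  | _, _ :: _, [] => 0
  | p, d :: ds, t :: ts =>
      (if level ≥ d then t else (p + t) * (d - level) + t) + costF level t ds ts

-- lateness of the first remaining level (0 for the empty list)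
def lateHead (level : Int) : List Int → Int
  | [] => 0
  | d :: _ => max (d - level) 0

-- B's weighted tail sum, in the exact shape of solve_alt's expression.
def bSum (level : Int) (ds ts : List Int) : Int :=
  ((ts.zip (((ds.map (fun d => max (d - level) 0)).zip
      ((ds.map (fun d => max (d - level) 0)).tail ++ [0])).map
        (fun x => 1 + x.1 + x.2))).map (fun x => x.1 * x.2)).sum

-- A's subtracting loop is the start value minus the sum of the per-index costs.
theorem foldl_sub_ite {α : Type} (p : α → Prop) [DecidablePred p] (u v : α → Int) :
    ∀ (l : List α) (acc : Int),
      l.foldl (fun lim i => if p i then lim - u i else lim - v i) acc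
        = acc - (l.map (fun i => if p i then u i else v i)).sum := by
  intro l
  induction l with
  | nil => simp
  | cons x xs ih =>
      intro acc
      by_cases hx : p x <;> simp [hx, ih] <;> ring

-- The indexed per-element cost sum of A's loop equals costF.
theorem indexed_eq_costF (level : Int) :
    ∀ (ds ts : List Int) (p : Int), ds.length ≤ ts.length →
      ((List.range ds.length).map (fun k =>
          if level ≥ ds.getD k 0 then ts.getD k 0
          else ((p :: ts).getD k 0 + ts.getD k 0) * (ds.getD k 0 - level) + ts.getD k 0)).sum
        = costF level p ds ts := by
  intro ds
  induction ds with
  | nil => intro ts p _; simp [costF]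
  | cons d ds' ih =>
      intro ts p hlen
      cases ts with
      | nil => simp at hlen
      | cons t ts' =>
          have hlen' : ds'.length ≤ ts'.length := by simpa using hlen
          simp only [List.length_cons, List.range_succ_eq_map, List.map_cons, List.map_map,
            List.sum_cons, costF]
          have hcomp :
              ((List.range ds'.length).map ((fun k =>
                  if level ≥ (d :: ds').getD k 0 then (t :: ts').getD k 0
                  else ((p :: t :: ts').getD k 0 + (t :: ts').getD k 0) *
                        ((d :: ds').getD k 0 - level) + (t :: ts').getD k 0) ∘ Nat.succ)).sum
                = ((List.range ds'.length).map (fun k =>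
                    if level ≥ ds'.getD k 0 then ts'.getD k 0
                    else ((t :: ts').getD k 0 + ts'.getD k 0) * (ds'.getD k 0 - level)
                          + ts'.getD k 0)).sum := by
            apply congrArg
            apply List.map_congr_left
            intro k _
            simp
          rw [hcomp, ih ts' t hlen']
          simp

-- costF regrouped per time value: previous-time contribution + B's weighted sum.
theorem costF_eq_bSum (level : Int) :
    ∀ (ds ts : List Int) (p : Int), ds.length ≤ ts.length →
      costF level p ds ts = p * lateHead level ds + bSum level ds ts := by
  intro ds
  induction ds with
  | nil => intro ts p _; simp [costF, lateHead, bSum]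
  | cons d ds' ih =>
      intro ts p hlen
      cases ts with
      | nil => simp at hlen
      | cons t ts' =>
          have hlen' : ds'.length ≤ ts'.length := by simpa using hlen
          have hrec := ih ts' t hlen'
          have hhead : (if level ≥ d then t else (p + t) * (d - level) + t)
              = p * max (d - level) 0 + t * (1 + max (d - level) 0) := by
            by_cases h : level ≥ d
            · have : max (d - level) 0 = 0 := by omega
              simp [h, this]
            · have : max (d - level) 0 = d - level := by omega
              simp [h, this]; ring
          rcases ds' with _ | ⟨d2, ds''⟩
          · simp [costF, bSum, lateHead, hhead]
          · simp only [costF, bSum, lateHead, List.map_cons, List.tail_cons,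
              List.cons_append, List.zip_cons_cons, List.sum_cons] at hrec ⊢
            rw [hhead, hrec]
            ring

theorem solve_spec_aux (level : Int) (diffs times : List Int) (limit : Int)
    (hpre : Pre_solve level diffs times limit) :
    solve level diffs times limit = solve_alt level diffs times limit := by
  obtain ⟨hne, hlen⟩ := hpre
  cases diffs with
  | nil => exact absurd rfl hne
  | cons d0 ds =>
      by_cases hg : PySem.List.pyGetD (d0 :: ds) 0 0 > level
      · simp only [solve, solve_alt]
        rw [if_pos hg, if_pos hg]
      · have hle : PySem.List.pyGetD (d0 :: ds) 0 0 ≤ level := by omega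
        have hd0 : d0 ≤ level := by simpa [PySem.List.pyGetD] using hle
        have hlen2 : ds.length + 1 ≤ times.length := by simpa using hlen hle
        cases times with
        | nil => simp at hlen2
        | cons t0 ts =>
            have hlen3 : ds.length ≤ ts.length := by simpa using hlen2
            simp only [solve, solve_alt]
            rw [if_neg hg, if_neg hg]
            have hn : ((((d0 :: ds).length : Int)) - 1).toNat = ds.length := by simp
            rw [PySem.List.pyRange_one, hn, List.foldl_map,
              foldl_sub_ite (fun k : Nat => level ≥ PySem.List.pyGetD (d0 :: ds) (1 + (k : Int)) 0)
                (fun k : Nat => PySem.List.pyGetD (t0 :: ts) (1 + (k : Int)) 0)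
                (fun k : Nat =>
                  (PySem.List.pyGetD (t0 :: ts) (1 + (k : Int) - 1) 0 +
                      PySem.List.pyGetD (t0 :: ts) (1 + (k : Int)) 0) *
                    (PySem.List.pyGetD (d0 :: ds) (1 + (k : Int)) 0 - level) +
                    PySem.List.pyGetD (t0 :: ts) (1 + (k : Int)) 0)]
            simp only [show ∀ k : Nat, (1 : Int) + (k : Int) = ((k + 1 : Nat) : Int) from
                fun k => by push_cast; ring,
              show ∀ k : Nat, ((k + 1 : Nat) : Int) - 1 = ((k : Nat) : Int) from
                fun k => by push_cast; ring,
              PySem.List.pyGetD_natCast, List.getD_cons_succ]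
            rw [indexed_eq_costF level ds ts t0 hlen3]
            have hB := costF_eq_bSum level ds ts t0 hlen3
            -- split B's dot product at its head element
            have hmax0 : max (d0 - level) 0 = 0 := by omega
            have hBtotal :
                (((t0 :: ts).zip ((((d0 :: ds).map (fun d => max (d - level) 0)).zip
                    (((d0 :: ds).map (fun d => max (d - level) 0)).tail ++ [0])).map
                      (fun x => 1 + x.1 + x.2))).map (fun x => x.1 * x.2)).sum
                  = t0 * (1 + lateHead level ds) + bSum level ds ts := by
              rcases ds with _ | ⟨d1, ds'⟩
              · simp [bSum, lateHead, hmax0]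
              · simp [bSum, lateHead, hmax0]
            rw [hBtotal, hB]
            simp only [PySem.List.pyGetD_zero_cons]
            apply decide_eq_decide.mpr
            constructor <;> intro h <;> linarith

-- ===== VERDICT (by name: the statement is the Claim_ definition above) =====
theorem solve_spec : Claim_equal_solve := by
  intro level diffs times limit _ hpre
  exact solve_spec_aux level diffs times limit hpre
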